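-- pv_equiv track=rewrite | github.com/kaluginpeter/Algorithms_and_structures_tasks | CodeWars/6kyu/Sort_sentence_pseudo_alphabetically.py | pseudo_sort
-- ===== SOURCE A (Python) =====
-- def pseudo_sort(st):
--     l, u = list(), list()
--     for i in st.split():
--         x = i
--         while x and not x[-1].isalpha():
--             x = x[:-1]
--         if x and x[0].isupper():
--             u.append(x)
--         elif x:
--             l.append(x)
--     l.sort()
--     u.sort(reverse=True)
--     ans = l + u
--     return ' '.join(ans)
-- ===== SOURCE B (Python) =====
-- def pseudo_sort(st):
--     def precedes(a, b):
--         au, bu = a[0].isupper(), b[0].isupper()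
--         if au != bu:
--             return not au  # lowercase-initial words come before uppercase-initial ones
--         if au:
--             return a >= b  # uppercase-initial group is in descending order
--         return a <= b      # lowercase-initial group is in ascending order
--
--     res = []
--     for w in st.split():
--         while w and not w[-1].isalpha():
--             w = w[:-1]
--         if not w:
--             continue
--         i = 0
--         while i < len(res) and precedes(res[i], w):
--             i += 1
--         res.insert(i, w)
--     return ' '.join(res)
-- ===== Notes on version B (the rewrite author's own statement) =====
-- stated objective: alternative
-- what changed: A partitions stripped words into two lists and runs two library sorts (one reversed) before concatenating; B never partitions and never calls a library sort: it builds the final arrangement directly with a hand-written insertion sort under a single custom comparator (lowercase-initial words ascending before uppercase-initial words descending).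
import Mathlib
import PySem

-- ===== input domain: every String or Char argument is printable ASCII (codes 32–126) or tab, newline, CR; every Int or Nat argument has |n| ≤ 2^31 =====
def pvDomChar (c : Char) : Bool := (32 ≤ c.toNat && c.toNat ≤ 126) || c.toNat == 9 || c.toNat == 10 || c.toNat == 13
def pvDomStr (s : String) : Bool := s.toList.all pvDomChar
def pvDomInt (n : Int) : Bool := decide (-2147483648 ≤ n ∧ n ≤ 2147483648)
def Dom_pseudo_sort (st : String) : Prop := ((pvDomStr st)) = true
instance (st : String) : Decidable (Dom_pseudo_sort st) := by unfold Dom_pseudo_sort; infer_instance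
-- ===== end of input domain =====

-- B replaces A's partition-plus-two-library-sorts with a single hand-written insertion
-- sort under one custom comparator (lower-initial ascending before upper-initial
-- descending); alternative decomposition, same result.

-- shared helper: the trailing-strip loop 'while x and not x[-1].isalpha(): x = x[:-1]'
-- (identical in both Pythons); exact: drops trailing non-alphabetic chars.
def pvDropTail : List Char → List Char
  | [] => []
  | c :: rest => if PySem.Chars.isalpha c then c :: rest else pvDropTail rest

def pvStrip (cs : List Char) : List Char := (pvDropTail cs.reverse).reverse

-- ===== PORT A =====
def pseudo_sort (st : String) : String :=
  let p := (PySem.Str.split₀ st).foldl (fun (acc : List String × List String) i =>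
      match pvStrip i.toList with
      | [] => acc
      | c :: cs =>
        if PySem.Chars.isupper c then (acc.1, acc.2 ++ [String.ofList (c :: cs)])
        else (acc.1 ++ [String.ofList (c :: cs)], acc.2)) ([], [])
  PySem.Str.join " " (PySem.List.sorted p.1 (fun s => s) false ++
                      PySem.List.sorted p.2 (fun s => s) true)

-- ===== PORT B =====
-- x[0].isupper() of a nonempty word (B only calls it on nonempty words)
def pvHeadUpper (w : String) : Bool :=
  match w.toList with
  | [] => false
  | c :: _ => PySem.Chars.isupper c

-- Source B's 'precedes(a, b)'
def pvPrecedes (a b : String) : Bool :=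
  if pvHeadUpper a != pvHeadUpper b then !(pvHeadUpper a)
  else if pvHeadUpper a then decide (b ≤ a) else decide (a ≤ b)

-- Source B's 'i = 0; while i < len(res) and precedes(res[i], w): i += 1; res.insert(i, w)'
def pvInsert (w : String) : List String → List String
  | [] => [w]
  | y :: ys => if pvPrecedes y w then y :: pvInsert w ys else w :: y :: ys

def pseudo_sort_alt (st : String) : String :=
  PySem.Str.join " " ((PySem.Str.split₀ st).foldl (fun (res : List String) i =>
    match pvStrip i.toList with
    | [] => res
    | c :: cs => pvInsert (String.ofList (c :: cs)) res) [])

-- ===== PRECONDITION & SPEC =====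
def Spec_pseudo_sort (st : String) (out : String) : Prop := out = pseudo_sort_alt st
instance (st : String) (out : String) : Decidable (Spec_pseudo_sort st out) := by unfold Spec_pseudo_sort; infer_instance

-- ===== CLAIM =====
def Claim_equal_pseudo_sort : Prop := ∀ (st : String), Dom_pseudo_sort st → Spec_pseudo_sort st (pseudo_sort st)

-- ===== LEMMAS AND PROOFS =====

-- the stripped, non-empty words of the input, in order
def pvWords (ws : List String) : List String :=
  ws.filterMap (fun i =>
    match pvStrip i.toList with
    | [] => none
    | c :: cs => some (String.ofList (c :: cs)))

-- comparator facts
theorem pvPrecedes_total (a b : String) :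
    pvPrecedes a b = true ∨ pvPrecedes b a = true := by
  unfold pvPrecedes
  by_cases h : pvHeadUpper a = pvHeadUpper b
  · cases hb : pvHeadUpper b <;> simp [h, hb] <;> exact le_total _ _
  · cases ha : pvHeadUpper a <;> cases hb : pvHeadUpper b <;> simp_all

theorem pvPrecedes_antisymm {a b : String}
    (h1 : pvPrecedes a b = true) (h2 : pvPrecedes b a = true) : a = b := by
  unfold pvPrecedes at h1 h2
  by_cases h : pvHeadUpper a = pvHeadUpper b
  · cases hb : pvHeadUpper b <;> rw [hb] at h <;>
      simp [h, hb, decide_eq_true_eq] at h1 h2 <;>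
      first
        | exact String.toList_inj.mp (le_antisymm h1 h2)
        | exact String.toList_inj.mp (le_antisymm h2 h1)
  · cases ha : pvHeadUpper a <;> cases hb : pvHeadUpper b <;> simp_all

theorem pvPrecedes_trans {a b c : String}
    (h1 : pvPrecedes a b = true) (h2 : pvPrecedes b c = true) : pvPrecedes a c = true := by
  unfold pvPrecedes at *
  cases ha : pvHeadUpper a <;> cases hb : pvHeadUpper b <;> cases hc : pvHeadUpper c <;>
    simp_all <;> first
      | exact le_trans h1 h2
      | exact le_trans h2 h1

-- pvInsert facts
theorem pvInsert_perm (w : String) (xs : List String) :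
    (pvInsert w xs).Perm (w :: xs) := by
  induction xs with
  | nil => simp [pvInsert]
  | cons y ys ih =>
    unfold pvInsert
    split_ifs
    · exact (ih.cons y).trans (List.Perm.swap w y ys)
    · exact List.Perm.refl _

theorem pvInsert_pairwise (w : String) (xs : List String)
    (h : xs.Pairwise (fun a b => pvPrecedes a b = true)) :
    (pvInsert w xs).Pairwise (fun a b => pvPrecedes a b = true) := by
  induction xs with
  | nil => simp [pvInsert]
  | cons y ys ih =>
    rcases List.pairwise_cons.mp h with ⟨hy, hys⟩
    unfold pvInsert
    split_ifs with hyw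
    · refine List.pairwise_cons.mpr ⟨?_, ih hys⟩
      intro z hz
      rcases List.mem_cons.mp ((pvInsert_perm w ys).mem_iff.mp hz) with rfl | hz
      · exact hyw
      · exact hy z hz
    · refine List.pairwise_cons.mpr ⟨?_, h⟩
      intro z hz
      have hwy : pvPrecedes w y = true := by
        rcases pvPrecedes_total y w with h' | h'
        · exact absurd h' hyw
        · exact h'
      rcases List.mem_cons.mp hz with rfl | hz
      · exact hwy
      · exact pvPrecedes_trans hwy (hy z hz)

-- B's fold: invariant over the accumulator
theorem pvFoldB (ws : List String) (acc : List String)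
    (hp : acc.Pairwise (fun a b => pvPrecedes a b = true)) :
    (ws.foldl (fun (res : List String) i =>
      match pvStrip i.toList with
      | [] => res
      | c :: cs => pvInsert (String.ofList (c :: cs)) res) acc).Pairwise
        (fun a b => pvPrecedes a b = true) ∧
    (ws.foldl (fun (res : List String) i =>
      match pvStrip i.toList with
      | [] => res
      | c :: cs => pvInsert (String.ofList (c :: cs)) res) acc).Perm
        (acc ++ pvWords ws) := by
  induction ws generalizing acc with
  | nil => exact ⟨hp, by simp [pvWords]⟩
  | cons w ws ih =>
    cases h : pvStrip w.toList with
    | nil =>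
      simp only [List.foldl_cons, h]
      have hw : pvWords (w :: ws) = pvWords ws := by simp [pvWords, h]
      rw [hw]
      exact ih acc hp
    | cons c cs =>
      simp only [List.foldl_cons, h]
      have := ih (pvInsert (String.ofList (c :: cs)) acc)
        (pvInsert_pairwise _ _ hp)
      refine ⟨this.1, this.2.trans ?_⟩
      have hw : pvWords (w :: ws) = String.ofList (c :: cs) :: pvWords ws := by
        simp [pvWords, h]
      rw [hw]
      exact ((pvInsert_perm _ acc).append_right _).trans
        (by simpa using List.perm_middle.symm)

-- A's fold resolves to filters of pvWords
theorem pvFoldA (ws : List String) (l0 u0 : List String) :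
    ws.foldl (fun (acc : List String × List String) i =>
      match pvStrip i.toList with
      | [] => acc
      | c :: cs =>
        if PySem.Chars.isupper c then (acc.1, acc.2 ++ [String.ofList (c :: cs)])
        else (acc.1 ++ [String.ofList (c :: cs)], acc.2)) (l0, u0)
    = (l0 ++ (pvWords ws).filter (fun w => !pvHeadUpper w),
       u0 ++ (pvWords ws).filter (fun w => pvHeadUpper w)) := by
  induction ws generalizing l0 u0 with
  | nil => simp [pvWords]
  | cons w ws ih =>
    simp only [List.foldl_cons, pvWords, List.filterMap_cons]
    cases h : pvStrip w.toList with
    | nil => simpa [pvWords] using ih l0 u0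
    | cons c cs =>
      by_cases hu : PySem.Chars.isupper c = true <;>
        simp [hu, ih, pvWords, pvHeadUpper, String.toList_ofList]

-- A's output list is pairwise-precedes
theorem pvA_pairwise (W : List String) :
    (PySem.List.sorted (W.filter (fun w => !pvHeadUpper w)) (fun s => s) false ++
     PySem.List.sorted (W.filter (fun w => pvHeadUpper w)) (fun s => s) true).Pairwise
      (fun a b => pvPrecedes a b = true) := by
  rw [List.pairwise_append]
  refine ⟨?_, ?_, ?_⟩
  · refine List.Pairwise.imp_of_mem ?_
      (PySem.List.sorted_pairwise (W.filter (fun w => !pvHeadUpper w)) (fun s => s))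
    intro a b ha hb hab
    have ha' : pvHeadUpper a = false := by
      simpa using (List.mem_filter.mp ((PySem.List.mem_sorted _ _ _ _).mp ha)).2
    have hb' : pvHeadUpper b = false := by
      simpa using (List.mem_filter.mp ((PySem.List.mem_sorted _ _ _ _).mp hb)).2
    simp [pvPrecedes, ha', hb', hab]
  · refine List.Pairwise.imp_of_mem ?_
      (PySem.List.sorted_pairwise_rev (W.filter (fun w => pvHeadUpper w)) (fun s => s))
    intro a b ha hb hab
    have ha' : pvHeadUpper a = true :=
      (List.mem_filter.mp ((PySem.List.mem_sorted _ _ _ _).mp ha)).2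
    have hb' : pvHeadUpper b = true :=
      (List.mem_filter.mp ((PySem.List.mem_sorted _ _ _ _).mp hb)).2
    simp [pvPrecedes, ha', hb', hab]
  · intro a ha b hb
    have ha' : pvHeadUpper a = false := by
      simpa using (List.mem_filter.mp ((PySem.List.mem_sorted _ _ _ _).mp ha)).2
    have hb' : pvHeadUpper b = true :=
      (List.mem_filter.mp ((PySem.List.mem_sorted _ _ _ _).mp hb)).2
    simp [pvPrecedes, ha', hb']

-- A's output list is a permutation of the word list
theorem pvA_perm (W : List String) :
    (PySem.List.sorted (W.filter (fun w => !pvHeadUpper w)) (fun s => s) false ++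
     PySem.List.sorted (W.filter (fun w => pvHeadUpper w)) (fun s => s) true).Perm W := by
  have h1 := (PySem.List.sorted_perm (W.filter (fun w => !pvHeadUpper w)) (fun s => s) false)
  have h2 := (PySem.List.sorted_perm (W.filter (fun w => pvHeadUpper w)) (fun s => s) true)
  refine (h1.append h2).trans ?_
  have := List.filter_append_perm (fun w => !pvHeadUpper w) W
  simpa [Bool.not_not] using this

-- two pairwise-precedes permutations of the same list are equal
theorem pvUnique {xs ys : List String}
    (hp : xs.Perm ys)
    (h1 : xs.Pairwise (fun a b => pvPrecedes a b = true))
    (h2 : ys.Pairwise (fun a b => pvPrecedes a b = true)) : xs = ys := by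
  exact List.Perm.eq_of_pairwise (le := fun a b : String => pvPrecedes a b = true)
    (fun a b _ _ ha hb => pvPrecedes_antisymm ha hb) h1 h2 hp

-- ===== VERDICT =====
theorem pseudo_sort_spec : Claim_equal_pseudo_sort := by
  intro st _
  unfold Spec_pseudo_sort pseudo_sort pseudo_sort_alt
  simp only [pvFoldA, List.nil_append]
  obtain ⟨hBp, hBperm⟩ := pvFoldB (PySem.Str.split₀ st) []
    (by simp)
  congr 1
  exact pvUnique
    ((pvA_perm (pvWords (PySem.Str.split₀ st))).trans (by simpa using hBperm.symm))
    (pvA_pairwise _) hBp
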